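-- pv_equiv track=rewrite | github.com/unibas-dmi-hpc/daphnescale | workflow/scripts/python/generate_balanced_quicksort_input.py | make_balanced_disorder
-- ===== SOURCE A (Python) =====
-- def make_balanced_disorder(n, max_depth):
--     arr = [0] * n
--
--     def fill(left, right, lo, hi, depth):
--         """
--         Fill arr[left:right] using values lo..hi inclusive.
--         left/right: index range
--         lo/hi:      value range
--         """
--         length = right - left
--         if length <= 0:
--             return
--
--         # Base case: scatter values in alternating high/low pattern
--         if depth == max_depth or length == 1:
--             vals = list(range(lo, hi + 1))
--             i, j = 0, len(vals) - 1
--             idx = left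
--             while i <= j:
--                 arr[idx] = vals[j]
--                 idx += 1
--                 if i != j:
--                     arr[idx] = vals[i]
--                     idx += 1
--                 i += 1
--                 j -= 1
--             return
--
--         # Place pivot at midpoint of array segment
--         mid = (left + right) // 2
--
--         # Use UPPER MEDIAN for even number of values
--         # This ensures left_count = left_size and right_count = right_size
--         pivot = lo + (hi - lo + 1) // 2
--
--         arr[mid] = pivot
--
--         # Compute sizes
--         left_size  = mid - left
--         right_size = right - (mid + 1)
--
--         # Compute value counts
--         left_count  = pivot - lo         # values lo..pivot-1
--         right_count = hi - pivot         # values pivot+1..hi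
--
--         # Safety checks for debugging
--         if left_size != left_count:
--             raise ValueError(
--                 f'Left mismatch: segment size {left_size} but value count {left_count} '
--                 f'(lo={lo}, hi={hi}, pivot={pivot}, left={left}, mid={mid})'
--             )
--         if right_size != right_count:
--             raise ValueError(
--                 f'Right mismatch: segment size {right_size} but value count {right_count} '
--                 f'(lo={lo}, hi={hi}, pivot={pivot}, mid={mid}, right={right})'
--             )
--
--         # Recursively fill left and right halves
--         fill(left, mid, lo, pivot - 1, depth + 1)
--         fill(mid + 1, right, pivot + 1, hi, depth + 1)
--
--     # Call the recursive generator
--     fill(0, n, 1, n, 0)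
--
--     return arr
-- ===== SOURCE B (Python) =====
-- def make_balanced_disorder(n, max_depth):
--     arr = [0] * n
--     stack = [(0, n, 1, n, 0)]
--     while stack:
--         left, right, lo, hi, depth = stack.pop()
--         length = right - left
--         if length <= 0:
--             continue
--         if depth == max_depth or length == 1:
--             vals = list(range(lo, hi + 1))
--             i, j = 0, len(vals) - 1
--             idx = left
--             while i <= j:
--                 arr[idx] = vals[j]
--                 idx += 1
--                 if i != j:
--                     arr[idx] = vals[i]
--                     idx += 1
--                 i += 1
--                 j -= 1
--             continue
--         mid = (left + right) // 2
--         pivot = lo + (hi - lo + 1) // 2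
--         arr[mid] = pivot
--         # push right child first so the left child is filled first (LIFO)
--         stack.append((mid + 1, right, pivot + 1, hi, depth + 1))
--         stack.append((left, mid, lo, pivot - 1, depth + 1))
--     return arr
-- ===== Notes on version B (the rewrite author's own statement) =====
-- stated objective: alternative
-- what changed: The recursive inner fill() helper is replaced by an explicit LIFO stack of (left,right,lo,hi,depth) frames driven by a single while loop (right child pushed before left to preserve the depth-first left-first order); the unreachable safety ValueError checks disappear.
import Mathlib
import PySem

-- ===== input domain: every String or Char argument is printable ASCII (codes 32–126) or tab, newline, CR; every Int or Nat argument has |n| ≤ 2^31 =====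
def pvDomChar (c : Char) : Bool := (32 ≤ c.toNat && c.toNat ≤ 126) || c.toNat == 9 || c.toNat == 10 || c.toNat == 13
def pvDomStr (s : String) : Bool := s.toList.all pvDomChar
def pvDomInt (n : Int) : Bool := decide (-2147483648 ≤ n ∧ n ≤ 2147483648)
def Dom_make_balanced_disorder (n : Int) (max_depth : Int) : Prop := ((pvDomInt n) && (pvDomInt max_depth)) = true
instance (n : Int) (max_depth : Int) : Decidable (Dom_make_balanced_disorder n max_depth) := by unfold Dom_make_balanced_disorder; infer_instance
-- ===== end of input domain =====

-- B replaces A's recursive fill() helper by an explicit LIFO stack of frames in one while loop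
-- (alternative decomposition, same cost); the return value is proved identical on all inputs.
-- Both loops are ported with a fuel argument that only makes the recursion structural; the
-- initial fuel is proved sufficient, so the fuel-exhaustion arms are never reached.

-- ===== PORT A =====

-- the scatter while-loop of the base case (textually identical in both Pythons, shared by
-- both ports); indices idx, i, j are nonnegative and in range in every reachable state, so
-- .toNat / getD are exact here; fuel ≥ number of iterations
def scatterLoop (fuel : Nat) (vals : List Int) (i j idx : Int) (arr : List Int) : List Int :=
  match fuel with
  | 0 => arr
  | fuel + 1 =>
    if i ≤ j then
      let arr1 := arr.set idx.toNat (vals.getD j.toNat 0)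
      if i ≠ j then
        scatterLoop fuel vals (i + 1) (j - 1) (idx + 2) (arr1.set (idx + 1).toNat (vals.getD i.toNat 0))
      else
        scatterLoop fuel vals (i + 1) (j - 1) (idx + 1) arr1
    else arr

-- vals = list(range(lo, hi+1)); i, j = 0, len(vals)-1; idx = left; while i <= j: …
def scatter (arr : List Int) (left lo hi : Int) : List Int :=
  let vals := PySem.List.pyRange lo (hi + 1) 1
  scatterLoop (vals.length + 1) vals 0 ((vals.length : Int) - 1) left arr

-- A's recursive fill; none = the ValueError of a failed safety check (or exhausted fuel:
-- the recursion depth is proved < fuel for the root call, lemma fillA_total below)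
def fillA (fuel : Nat) (max_depth left right lo hi depth : Int) (arr : List Int) : Option (List Int) :=
  match fuel with
  | 0 => none
  | fuel + 1 =>
    let length := right - left
    if length ≤ 0 then some arr
    else if depth = max_depth ∨ length = 1 then some (scatter arr left lo hi)
    else
      let mid := PySem.Int.floordiv (left + right) 2
      let pivot := lo + PySem.Int.floordiv (hi - lo + 1) 2
      let arr1 := arr.set mid.toNat pivot   -- arr[mid] = pivot; mid is in range in every reachable state
      if mid - left ≠ pivot - lo then none
      else if right - (mid + 1) ≠ hi - pivot then none
      else match fillA fuel max_depth left mid lo (pivot - 1) (depth + 1) arr1 with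
        | none => none
        | some arr2 => fillA fuel max_depth (mid + 1) right (pivot + 1) hi (depth + 1) arr2

-- the none case is provably unreachable from this root call (lemma fillA_total below)
def make_balanced_disorder (n : Int) (max_depth : Int) : List Int :=
  match fillA (n.toNat + 1) max_depth 0 n 1 n 0 (List.replicate n.toNat 0) with
  | some a => a
  | none => []

-- ===== PORT B =====

-- the while loop over the explicit stack; pop = head of the list; one fuel per iteration
def runStack (fuel : Nat) (max_depth : Int) (arr : List Int) (stack : List (Int × Int × Int × Int × Int)) : List Int :=
  match stack with
  | [] => arr
  | (left, right, lo, hi, depth) :: rest =>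
    match fuel with
    | 0 => arr
    | fuel + 1 =>
      let length := right - left
      if length ≤ 0 then runStack fuel max_depth arr rest
      else if depth = max_depth ∨ length = 1 then runStack fuel max_depth (scatter arr left lo hi) rest
      else
        let mid := PySem.Int.floordiv (left + right) 2
        let pivot := lo + PySem.Int.floordiv (hi - lo + 1) 2
        runStack fuel max_depth (arr.set mid.toNat pivot)
          ((left, mid, lo, pivot - 1, depth + 1) :: (mid + 1, right, pivot + 1, hi, depth + 1) :: rest)

def make_balanced_disorder_alt (n : Int) (max_depth : Int) : List Int :=
  runStack (2 * n.toNat + 2) max_depth (List.replicate n.toNat 0) [(0, n, 1, n, 0)]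

-- ===== PRECONDITION & SPEC =====
def Spec_make_balanced_disorder (n : Int) (max_depth : Int) (out : List Int) : Prop := out = make_balanced_disorder_alt n max_depth
instance (n : Int) (max_depth : Int) (out : List Int) : Decidable (Spec_make_balanced_disorder n max_depth out) := by unfold Spec_make_balanced_disorder; infer_instance

-- ===== CLAIM (what is proved, stated in full; the proofs are below) =====
def Claim_equal_make_balanced_disorder : Prop := ∀ (n : Int) (max_depth : Int), Dom_make_balanced_disorder n max_depth → Spec_make_balanced_disorder n max_depth (make_balanced_disorder n max_depth)

-- ===== LEMMAS AND PROOFS =====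

-- A's two safety checks always pass and the fuel never runs out when the segment carries
-- exactly as many values as slots (right - left = hi - lo + 1, the invariant of the root
-- call and of both children) and fuel exceeds the segment length
lemma fillA_total : ∀ (f : Nat) (md l r lo hi d : Int) (arr : List Int),
    (r - l).toNat < f → r - l = hi - lo + 1 →
    ∃ res, fillA f md l r lo hi d arr = some res := by
  intro f
  induction f with
  | zero => intro md l r lo hi d arr hf; omega
  | succ f ih =>
    intro md l r lo hi d arr hf hinv
    by_cases h1 : r - l ≤ 0
    · exact ⟨arr, by simp only [fillA, h1, if_pos]⟩
    · by_cases h2 : d = md ∨ r - l = 1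
      · exact ⟨scatter arr l lo hi, by simp [fillA, h1, h2]⟩
      · have hL : 2 ≤ r - l := by rcases not_or.mp h2 with ⟨_, h⟩; omega
        have hm : PySem.Int.floordiv (l + r) 2 = (l + r) / 2 :=
          PySem.Int.floordiv_eq_ediv_of_pos (by omega)
        have hp : PySem.Int.floordiv (hi - lo + 1) 2 = (hi - lo + 1) / 2 :=
          PySem.Int.floordiv_eq_ediv_of_pos (by omega)
        have hchk1 : PySem.Int.floordiv (l + r) 2 - l = lo + PySem.Int.floordiv (hi - lo + 1) 2 - lo := by
          rw [hm, hp]; omega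
        have hchk2 : r - (PySem.Int.floordiv (l + r) 2 + 1) = hi - (lo + PySem.Int.floordiv (hi - lo + 1) 2) := by
          rw [hm, hp]; omega
        obtain ⟨arr2, hL2⟩ := ih md l (PySem.Int.floordiv (l + r) 2) lo
          (lo + PySem.Int.floordiv (hi - lo + 1) 2 - 1) (d + 1)
          ((arr.set (PySem.Int.floordiv (l + r) 2).toNat (lo + PySem.Int.floordiv (hi - lo + 1) 2)))
          (by rw [hm]; omega) (by omega)
        obtain ⟨res, hR2⟩ := ih md (PySem.Int.floordiv (l + r) 2 + 1) r
          (lo + PySem.Int.floordiv (hi - lo + 1) 2 + 1) hi (d + 1) arr2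
          (by rw [hm]; omega) (by omega)
        refine ⟨res, ?_⟩
        rw [fillA]
        simp only [h1, h2, if_false, not_not.mpr hchk1, not_not.mpr hchk2]
        rw [hL2]
        exact hR2

-- whenever A's fill returns normally, processing its frame on B's stack computes the same
-- array in at most 2·length+1 iterations and continues with the remaining frames
lemma runStack_fillA : ∀ (f : Nat) (md l r lo hi d : Int) (arr res : List Int),
    fillA f md l r lo hi d arr = some res →
    ∃ k : Nat, k ≤ 2 * (r - l).toNat + 1 ∧
      ∀ (g : Nat) (fs : List (Int × Int × Int × Int × Int)),
        runStack (k + g) md arr ((l, r, lo, hi, d) :: fs) = runStack g md res fs := by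
  intro f
  induction f with
  | zero => intro md l r lo hi d arr res hsome; simp [fillA] at hsome
  | succ f ih =>
    intro md l r lo hi d arr res hsome
    rw [fillA] at hsome
    by_cases h1 : r - l ≤ 0
    · rw [if_pos h1] at hsome
      refine ⟨1, by omega, fun g fs => ?_⟩
      have e1 : 1 + g = g + 1 := by omega
      rw [e1, runStack]
      simp only [if_pos h1]
      rw [Option.some.inj hsome]
    · rw [if_neg h1] at hsome
      by_cases h2 : d = md ∨ r - l = 1
      · rw [if_pos h2] at hsome
        refine ⟨1, by omega, fun g fs => ?_⟩
        have e1 : 1 + g = g + 1 := by omega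
        rw [e1, runStack]
        simp only [if_neg h1, if_pos h2]
        rw [Option.some.inj hsome]
      · rw [if_neg h2] at hsome
        by_cases hchk1 : PySem.Int.floordiv (l + r) 2 - l ≠ lo + PySem.Int.floordiv (hi - lo + 1) 2 - lo
        · rw [if_pos hchk1] at hsome; exact absurd hsome (by simp)
        by_cases hchk2 : r - (PySem.Int.floordiv (l + r) 2 + 1) ≠ hi - (lo + PySem.Int.floordiv (hi - lo + 1) 2)
        · rw [if_neg hchk1, if_pos hchk2] at hsome; exact absurd hsome (by simp)
        rw [if_neg hchk1, if_neg hchk2] at hsome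
        cases heqL : fillA f md l (PySem.Int.floordiv (l + r) 2) lo
            (lo + PySem.Int.floordiv (hi - lo + 1) 2 - 1) (d + 1)
            (arr.set (PySem.Int.floordiv (l + r) 2).toNat (lo + PySem.Int.floordiv (hi - lo + 1) 2)) with
        | none => rw [heqL] at hsome; exact absurd hsome (by simp)
        | some arr2 =>
          rw [heqL] at hsome
          have hR : fillA f md (PySem.Int.floordiv (l + r) 2 + 1) r
              (lo + PySem.Int.floordiv (hi - lo + 1) 2 + 1) hi (d + 1) arr2 = some res := hsome
          obtain ⟨k1, hk1b, hk1⟩ := ih md _ _ _ _ _ _ _ heqL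
          obtain ⟨k2, hk2b, hk2⟩ := ih md _ _ _ _ _ _ _ hR
          have hL : 2 ≤ r - l := by rcases not_or.mp h2 with ⟨_, h⟩; omega
          have hm : PySem.Int.floordiv (l + r) 2 = (l + r) / 2 :=
            PySem.Int.floordiv_eq_ediv_of_pos (by omega)
          refine ⟨k1 + k2 + 1, by rw [hm] at hk1b hk2b; omega, fun g fs => ?_⟩
          have e : k1 + k2 + 1 + g = (k1 + (k2 + g)) + 1 := by omega
          rw [e, runStack]
          simp only [if_neg h1, if_neg h2]
          rw [hk1, hk2]

-- ===== VERDICT (by name: the statement is the Claim_ definition above) =====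
theorem make_balanced_disorder_spec : Claim_equal_make_balanced_disorder := by
  intro n md _
  unfold Spec_make_balanced_disorder make_balanced_disorder make_balanced_disorder_alt
  obtain ⟨res, hres⟩ := fillA_total (n.toNat + 1) md 0 n 1 n 0 (List.replicate n.toNat 0)
    (by omega) (by omega)
  rw [hres]
  obtain ⟨k, hkb, hk⟩ := runStack_fillA (n.toNat + 1) md 0 n 1 n 0 _ res hres
  have e : 2 * n.toNat + 2 = k + (2 * n.toNat + 2 - k) := by omega
  rw [e, hk, runStack]
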